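-- pv_equiv track=rewrite | github.com/Thanukamax/h-cli | scripts/gen_mascot.py | make_heart
-- ===== SOURCE A (Python) =====
-- RB = (255, 60, 120, 255)      # ribbon / bow accent
--
-- def make_heart(pixels: list) -> list:
--     """Create heart frame — add a floating heart to the right of head."""
--     out = []
--     for i, row in enumerate(pixels):
--         if i == 8:
--             # Place a small heart shape at the right side
--             new = list(row)
--             # Heart at columns 38-42 area (in the transparent space)
--             heart_pixels = {
--                 (38, 7): RB, (39, 7): RB, (41, 7): RB, (42, 7): RB,
--                 (37, 8): RB, (38, 8): RB, (39, 8): RB, (40, 8): RB,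
--                 (41, 8): RB, (42, 8): RB, (43, 8): RB,
--             }
--             for (hx, hy), _ in heart_pixels.items():
--                 if hy == i and 0 <= hx < 48:
--                     new[hx] = "R"
--             out.append("".join(new))
--         elif i == 7:
--             new = list(row)
--             for hx in [38, 39, 41, 42]:
--                 if 0 <= hx < 48:
--                     new[hx] = "R"
--             out.append("".join(new))
--         elif i == 9:
--             new = list(row)
--             for hx in [38, 39, 40, 41, 42]:
--                 if 0 <= hx < 48:
--                     new[hx] = "R"
--             out.append("".join(new))
--         elif i == 10:
--             new = list(row)
--             for hx in [39, 40, 41]: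
--                 if 0 <= hx < 48:
--                     new[hx] = "R"
--             out.append("".join(new))
--         elif i == 11:
--             new = list(row)
--             for hx in [40]:
--                 if 0 <= hx < 48:
--                     new[hx] = "R"
--             out.append("".join(new))
--         else:
--             out.append(row)
--     return out
-- ===== SOURCE B (Python) =====
-- # Geometric rewrite: the heart is a closed-form mask |j-40| <= 11-i (rows 8-11)
-- # plus the notched top row (1 <= |j-40| <= 2 at i == 7); each affected row is
-- # rebuilt character-by-character from that predicate instead of overwriting
-- # listed column positions in a mutable list.
--
-- def in_heart(i, j):
--     d = abs(j - 40)
--     if i == 7: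
--         return 1 <= d <= 2
--     if 8 <= i <= 11:
--         return d <= 11 - i
--     return False
--
-- def make_heart(pixels: list) -> list:
--     return [
--         "".join("R" if in_heart(i, j) else ch for j, ch in enumerate(row))
--         if 7 <= i <= 11 else row
--         for i, row in enumerate(pixels)
--     ]
-- ===== Notes on version B (the rewrite author's own statement) =====
-- stated objective: alternative
-- what changed: A overwrites hard-coded column positions in a mutable char list per affected row; B derives the heart from a closed-form geometric mask (|j-40| <= 11-i for rows 8-11, notched 1<=|j-40|<=2 at row 7) and rebuilds each affected row character-by-character from that predicate.
import Mathlib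
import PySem

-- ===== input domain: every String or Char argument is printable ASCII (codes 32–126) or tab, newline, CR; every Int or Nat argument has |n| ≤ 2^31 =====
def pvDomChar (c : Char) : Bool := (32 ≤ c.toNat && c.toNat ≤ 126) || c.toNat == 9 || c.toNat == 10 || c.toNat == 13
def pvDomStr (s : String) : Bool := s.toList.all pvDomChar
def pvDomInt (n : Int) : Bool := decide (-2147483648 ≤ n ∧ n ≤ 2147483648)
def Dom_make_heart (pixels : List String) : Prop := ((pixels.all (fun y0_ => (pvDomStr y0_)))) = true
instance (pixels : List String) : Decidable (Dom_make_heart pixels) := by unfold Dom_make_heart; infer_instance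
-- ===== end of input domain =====

-- B replaces A's per-row overwrite lists by a closed-form geometric mask
-- |j-40| ≤ 11-i (plus the notched top row i = 7) and rebuilds each affected row
-- character-by-character (objective: alternative); return values proved equal on Pre_.

-- ===== PORT A =====
-- `new[hx] = "R"`: Python raises IndexError when hx ≥ len(new); Pre_make_heart excludes
-- exactly those inputs (List.set is a no-op there). hx ≥ 0 at every call site (guarded).
def pvSetR (new : List Char) (hx : Int) : List Char := new.set hx.toNat 'R'

def RB : Int × Int × Int × Int := (255, 60, 120, 255)

-- the literal `heart_pixels` dict of the i == 8 branch, in insertion order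
def pvHeartPixels : List ((Int × Int) × (Int × Int × Int × Int)) :=
  [((38, 7), RB), ((39, 7), RB), ((41, 7), RB), ((42, 7), RB),
   ((37, 8), RB), ((38, 8), RB), ((39, 8), RB), ((40, 8), RB),
   ((41, 8), RB), ((42, 8), RB), ((43, 8), RB)]

-- the `for hx in [...]: if 0 <= hx < 48: new[hx] = "R"` loops of the other branches
def pvLoopCols (cols : List Int) (row : String) : String :=
  String.mk (cols.foldl (fun new hx => if 0 ≤ hx ∧ hx < 48 then pvSetR new hx else new) row.toList)

def pvGoA (i : Nat) : List String → List String
  | [] => []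
  | row :: rest =>
    (if (i : Int) = 8 then
      String.mk (pvHeartPixels.foldl
        (fun new p =>
          let hx := p.1.1
          let hy := p.1.2
          if hy = (i : Int) ∧ 0 ≤ hx ∧ hx < 48 then pvSetR new hx else new)
        row.toList)
    else if (i : Int) = 7 then pvLoopCols [38, 39, 41, 42] row
    else if (i : Int) = 9 then pvLoopCols [38, 39, 40, 41, 42] row
    else if (i : Int) = 10 then pvLoopCols [39, 40, 41] row
    else if (i : Int) = 11 then pvLoopCols [40] row
    else row) :: pvGoA (i + 1) rest

def make_heart (pixels : List String) : List String := pvGoA 0 pixels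

-- ===== PORT B =====
-- in_heart(i, j): the closed-form heart mask (|j-40| via Int.natAbs = Python abs on ints)
def inHeart (i j : Int) : Bool :=
  let d : Int := (j - 40).natAbs
  if i = 7 then decide (1 ≤ d ∧ d ≤ 2)
  else if 8 ≤ i ∧ i ≤ 11 then decide (d ≤ 11 - i)
  else false

-- `"".join("R" if in_heart(i, j) else ch for j, ch in enumerate(row))`
def pvMaskRow (i : Nat) (row : String) : String :=
  String.mk (row.toList.mapIdx (fun j ch => if inHeart (i : Int) (j : Int) then 'R' else ch))

def pvGoB (i : Nat) : List String → List String
  | [] => []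
  | row :: rest =>
    (if 7 ≤ (i : Int) ∧ (i : Int) ≤ 11 then pvMaskRow i row else row) :: pvGoB (i + 1) rest

def make_heart_alt (pixels : List String) : List String := pvGoB 0 pixels

-- ===== PRECONDITION & SPEC =====
-- Pre_ excludes exactly the inputs on which Python A raises IndexError: an affected
-- row (index 7..11, if present) shorter than 1 + its largest painted column.
def pvRowLongEnough (pixels : List String) (i need : Nat) : Prop :=
  i < pixels.length → need ≤ (pixels.getD i "").toList.length

def Pre_make_heart (pixels : List String) : Prop :=
  pvRowLongEnough pixels 7 43 ∧ pvRowLongEnough pixels 8 44 ∧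
  pvRowLongEnough pixels 9 43 ∧ pvRowLongEnough pixels 10 42 ∧
  pvRowLongEnough pixels 11 41
instance (pixels : List String) : Decidable (Pre_make_heart pixels) := by
  unfold Pre_make_heart pvRowLongEnough; infer_instance

def pvWitness_make_heart : List String := ["ab", "cd"]

def Spec_make_heart (pixels : List String) (out : List String) : Prop := out = make_heart_alt pixels
instance (pixels : List String) (out : List String) : Decidable (Spec_make_heart pixels out) := by unfold Spec_make_heart; infer_instance

-- ===== CLAIM (what is proved, stated in full; the proofs are below) =====
def Claim_equal_make_heart : Prop := ∀ (pixels : List String), Dom_make_heart pixels → Pre_make_heart pixels → Spec_make_heart pixels (make_heart pixels)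

-- ===== LEMMAS AND PROOFS =====

-- painting a list of (in-range) columns, as A does it, written over Nat columns
def paintRow (row : String) (cols : List Nat) : String :=
  String.mk (cols.foldl (fun new hx => new.set hx 'R') row.toList)

-- A's concrete branch folds all reduce to paintRow of the column list
theorem rowA7 (row : String) : pvLoopCols [38, 39, 41, 42] row = paintRow row [38, 39, 41, 42] := rfl
theorem rowA8 (row : String) :
    String.mk (pvHeartPixels.foldl
      (fun new p =>
        let hx := p.1.1
        let hy := p.1.2
        if hy = ((8 : Nat) : Int) ∧ 0 ≤ hx ∧ hx < 48 then pvSetR new hx else new)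
      row.toList) = paintRow row [37, 38, 39, 40, 41, 42, 43] := rfl
theorem rowA9 (row : String) : pvLoopCols [38, 39, 40, 41, 42] row = paintRow row [38, 39, 40, 41, 42] := rfl
theorem rowA10 (row : String) : pvLoopCols [39, 40, 41] row = paintRow row [39, 40, 41] := rfl
theorem rowA11 (row : String) : pvLoopCols [40] row = paintRow row [40] := rfl

-- positional overwriting equals pointwise membership mapping
theorem foldl_set_eq_mapIdx (cols : List Nat) (l : List Char) :
    cols.foldl (fun new hx => new.set hx 'R') l
      = l.mapIdx (fun j ch => if j ∈ cols then 'R' else ch) := by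
  induction cols generalizing l with
  | nil =>
    apply List.ext_getElem <;> simp
  | cons c cs ih =>
    simp only [List.foldl_cons, ih]
    apply List.ext_getElem
    · simp
    · intro j h1 h2
      simp only [List.getElem_mapIdx, List.getElem_set, List.mem_cons]
      by_cases hcs : j ∈ cs <;> by_cases hc : c = j <;>
        simp [hcs, hc, List.length_set] at h1 ⊢ <;> tauto

-- the mask agrees with the column lists at each affected row index
theorem mask7 (j : Nat) : inHeart 7 j = decide (j ∈ ([38, 39, 41, 42] : List Nat)) := by
  simp only [inHeart, List.mem_cons, List.not_mem_nil, or_false, if_true, decide_eq_decide]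
  omega
theorem mask8 (j : Nat) : inHeart 8 j = decide (j ∈ ([37, 38, 39, 40, 41, 42, 43] : List Nat)) := by
  simp only [inHeart, if_neg (by norm_num : ¬((8 : Int) = 7)),
    if_pos (by norm_num : (8 : Int) ≤ 8 ∧ (8 : Int) ≤ 11),
    List.mem_cons, List.not_mem_nil, or_false, decide_eq_decide]
  omega
theorem mask9 (j : Nat) : inHeart 9 j = decide (j ∈ ([38, 39, 40, 41, 42] : List Nat)) := by
  simp only [inHeart, if_neg (by norm_num : ¬((9 : Int) = 7)),
    if_pos (by norm_num : (8 : Int) ≤ 9 ∧ (9 : Int) ≤ 11),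
    List.mem_cons, List.not_mem_nil, or_false, decide_eq_decide]
  omega
theorem mask10 (j : Nat) : inHeart 10 j = decide (j ∈ ([39, 40, 41] : List Nat)) := by
  simp only [inHeart, if_neg (by norm_num : ¬((10 : Int) = 7)),
    if_pos (by norm_num : (8 : Int) ≤ 10 ∧ (10 : Int) ≤ 11),
    List.mem_cons, List.not_mem_nil, or_false, decide_eq_decide]
  omega
theorem mask11 (j : Nat) : inHeart 11 j = decide (j ∈ ([40] : List Nat)) := by
  simp only [inHeart, if_neg (by norm_num : ¬((11 : Int) = 7)),
    if_pos (by norm_num : (8 : Int) ≤ 11 ∧ (11 : Int) ≤ 11),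
    List.mem_cons, List.not_mem_nil, or_false, decide_eq_decide]
  omega

theorem paint_eq_mask (i : Nat) (cols : List Nat) (row : String)
    (h : ∀ j : Nat, inHeart (i : Int) (j : Int) = decide (j ∈ cols)) :
    paintRow row cols = pvMaskRow i row := by
  unfold paintRow pvMaskRow
  rw [foldl_set_eq_mapIdx]
  congr 1
  apply List.ext_getElem
  · simp
  · intro j h1 h2
    simp only [List.getElem_mapIdx, h j]
    by_cases hm : j ∈ cols <;> simp [hm]

theorem goA_eq_goB (rows : List String) : ∀ i : Nat, pvGoA i rows = pvGoB i rows := by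
  induction rows with
  | nil => intro i; rfl
  | cons row rest ih =>
    intro i
    simp only [pvGoA, pvGoB, ih]
    congr 1
    by_cases h8 : i = 8
    · subst h8
      rw [if_pos (by norm_num), if_pos (by norm_num)]
      exact (rowA8 row).trans (paint_eq_mask 8 _ row mask8)
    · rw [if_neg (by exact_mod_cast h8)]
      by_cases h7 : i = 7
      · subst h7
        rw [if_pos (by norm_num), if_pos (by norm_num)]
        exact (rowA7 row).trans (paint_eq_mask 7 _ row mask7)
      · rw [if_neg (by exact_mod_cast h7)]
        by_cases h9 : i = 9
        · subst h9
          rw [if_pos (by norm_num), if_pos (by norm_num)]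
          exact (rowA9 row).trans (paint_eq_mask 9 _ row mask9)
        · rw [if_neg (by exact_mod_cast h9)]
          by_cases h10 : i = 10
          · subst h10
            rw [if_pos (by norm_num), if_pos (by norm_num)]
            exact (rowA10 row).trans (paint_eq_mask 10 _ row mask10)
          · rw [if_neg (by exact_mod_cast h10)]
            by_cases h11 : i = 11
            · subst h11
              rw [if_pos (by norm_num), if_pos (by norm_num)]
              exact (rowA11 row).trans (paint_eq_mask 11 _ row mask11)
            · rw [if_neg (by exact_mod_cast h11)]
              rw [if_neg (by omega)]

-- ===== VERDICT (by name: the statement is the Claim_ definition above) =====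
theorem make_heart_spec : Claim_equal_make_heart := by
  intro pixels _ _
  unfold Spec_make_heart make_heart make_heart_alt
  exact goA_eq_goB pixels 0
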